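-- pv_equiv track=rewrite | github.com/ostnam/mRosalind | SUBO/count_instances.py | count_instances
-- ===== SOURCE A (Python) =====
-- def count_instances(pat, seq):
--     count = 0
--     for i in range(len(seq)-len(pat)):
--         diff = 0
--         substring = seq[i:i+len(pat)+1]
--         for (a, b) in zip(pat, substring):
--             if a != b:
--                 diff += 1
--         if diff <= 3:
--             count +=1
--     return count
-- ===== SOURCE B (Python) =====
-- def count_instances(pat, seq):
--     n = len(seq) - len(pat)
--     if n <= 0:
--         return 0
--     diffs = [0] * n
--     for j, c in enumerate(pat):
--         diffs = [d + (1 if c != seq[i + j] else 0) for i, d in enumerate(diffs)]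
--     return sum(1 for d in diffs if d <= 3)
-- ===== Notes on version B (the rewrite author's own statement) =====
-- stated objective: alternative
-- what changed: B transposes the traversal: instead of scanning each alignment's substring in an inner loop, it builds a per-alignment mismatch table column by column (outer loop over pattern positions) and then counts table entries <= 3 in a separate pass.
import Mathlib
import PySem

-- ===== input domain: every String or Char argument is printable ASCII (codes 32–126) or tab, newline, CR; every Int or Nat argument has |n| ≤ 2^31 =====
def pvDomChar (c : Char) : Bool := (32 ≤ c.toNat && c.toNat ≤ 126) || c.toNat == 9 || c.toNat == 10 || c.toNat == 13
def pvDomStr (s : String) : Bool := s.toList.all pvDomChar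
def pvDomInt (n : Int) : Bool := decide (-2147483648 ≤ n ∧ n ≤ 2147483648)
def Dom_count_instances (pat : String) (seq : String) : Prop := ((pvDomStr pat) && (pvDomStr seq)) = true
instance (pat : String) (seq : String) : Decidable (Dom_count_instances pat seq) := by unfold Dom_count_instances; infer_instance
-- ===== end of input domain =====

-- B builds the per-alignment mismatch table column-by-column, then counts in a second pass (alternative decomposition, same cost).
-- ===== PORT A =====
def count_instances (pat : String) (seq : String) : Int :=
  (PySem.List.pyRange 0 (PySem.Str.len seq - PySem.Str.len pat) 1).foldl
    (fun count i =>
      let substring := PySem.List.slice seq.toList (some i) (some (i + PySem.Str.len pat + 1))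
      let diff := (pat.toList.zip substring).foldl
        (fun d ab => if ab.1 ≠ ab.2 then d + 1 else d) (0 : Int)
      if diff ≤ 3 then count + 1 else count) 0

-- ===== PORT B =====
-- one column pass: diffs = [d + (1 if c != seq[i+j] else 0) for i, d in enumerate(diffs)]
def ci_col (s : List Char) (diffs : List Int) (jc : Int × Char) : List Int :=
  (PySem.List.enumerate diffs 0).map
    (fun id => id.2 + (if jc.2 ≠ PySem.List.pyGetD s (id.1 + jc.1) ' ' then 1 else 0))

def count_instances_alt (pat : String) (seq : String) : Int :=
  let n : Int := PySem.Str.len seq - PySem.Str.len pat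
  if n ≤ 0 then 0
  else
    let diffs := List.replicate n.toNat (0 : Int)
    let diffs := (PySem.List.enumerate pat.toList 0).foldl (ci_col seq.toList) diffs
    diffs.foldl (fun acc d => if d ≤ 3 then acc + 1 else acc) 0

-- ===== PRECONDITION & SPEC =====
def Spec_count_instances (pat : String) (seq : String) (out : Int) : Prop := out = count_instances_alt pat seq
instance (pat : String) (seq : String) (out : Int) : Decidable (Spec_count_instances pat seq out) := by unfold Spec_count_instances; infer_instance

-- ===== CLAIM (what is proved, stated in full; the proofs are below) =====
def Claim_equal_count_instances : Prop := ∀ (pat : String) (seq : String), Dom_count_instances pat seq → Spec_count_instances pat seq (count_instances pat seq)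

-- ===== LEMMAS AND PROOFS =====

theorem enum_char (xs : List Char) (a : Int) :
    PySem.List.enumerate xs a
      = (List.range xs.length).map (fun (j : Nat) => (a + (j : Int), xs.getD j ' ')) := by
  induction xs generalizing a with
  | nil => simp [PySem.List.enumerate_nil]
  | cons x t ih =>
      rw [PySem.List.enumerate_cons, ih]
      simp [List.range_succ_eq_map, List.map_map, Function.comp_def]
      intro j _
      ring

theorem enum_int (xs : List Int) (a : Int) :
    PySem.List.enumerate xs a
      = (List.range xs.length).map (fun (j : Nat) => (a + (j : Int), xs.getD j 0)) := by
  induction xs generalizing a with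
  | nil => simp [PySem.List.enumerate_nil]
  | cons x t ih =>
      rw [PySem.List.enumerate_cons, ih]
      simp [List.range_succ_eq_map, List.map_map, Function.comp_def]
      intro j _
      ring

theorem ci_col_length (s : List Char) (ds : List Int) (jc : Int × Char) :
    (ci_col s ds jc).length = ds.length := by
  simp [ci_col, enum_int]

theorem ci_col_getD (s : List Char) (ds : List Int) (jc : Int × Char) (k : Nat)
    (hk : k < ds.length) :
    (ci_col s ds jc).getD k 0
      = ds.getD k 0 + (if jc.2 ≠ PySem.List.pyGetD s ((k : Int) + jc.1) ' ' then 1 else 0) := by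
  rw [ci_col, enum_int, List.map_map]
  rw [List.getD_eq_getElem?_getD, List.getElem?_map, List.getElem?_range hk]
  simp [List.getD_eq_getElem?_getD]

def mism (p s : List Char) (k : Nat) : Nat :=
  (List.range p.length).countP (fun j => decide (p.getD j ' ' ≠ s.getD (k + j) ' '))

theorem zip_window (p s : List Char) (k : Nat) (h : k + p.length ≤ s.length) :
    p.zip ((s.drop k).take (p.length + 1))
      = (List.range p.length).map (fun j => (p.getD j ' ', s.getD (k + j) ' ')) := by
  apply List.ext_getElem
  · simp; omega
  · intro j h1 h2
    have hj : j < p.length := by simpa using h2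
    have hkj : k + j < s.length := by omega
    simp [List.getElem_zip, List.getElem_take, List.getElem_drop,
      List.getD_eq_getElem?_getD, hj, hkj]

theorem diffA_eq (p s : List Char) (i : Int) (h0 : 0 ≤ i)
    (h1 : i.toNat + p.length ≤ s.length) :
    ((p.zip (PySem.List.slice s (some i) (some (i + (p.length : Int) + 1)))).foldl
        (fun d ab => if ab.1 ≠ ab.2 then d + 1 else d) (0 : Int))
      = (mism p s i.toNat : Int) := by
  obtain ⟨k, rfl⟩ : ∃ kk : Nat, i = (kk : Int) := ⟨i.toNat, by omega⟩
  have hk1 : k + p.length ≤ s.length := by simpa using h1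
  have hb : (k : Int) + (p.length : Int) + 1 = ((k + p.length + 1 : Nat) : Int) := by push_cast; ring
  rw [hb, PySem.List.slice_natCast]
  have htb : k + p.length + 1 - k = p.length + 1 := by omega
  rw [htb, zip_window p s k hk1,
    PySem.List.foldl_ite_add_one (p := fun ab : Char × Char => ab.1 ≠ ab.2),
    List.countP_map]
  simp [mism, Function.comp_def]

theorem colfold_length (s : List Char) (L : List (Int × Char)) (ds : List Int) :
    (L.foldl (ci_col s) ds).length = ds.length := by
  induction L generalizing ds with
  | nil => rfl
  | cons jc t ih => simpa [ci_col_length] using ih (ci_col s ds jc)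

theorem colfold_getD (s : List Char) (L : List (Int × Char)) (ds : List Int) (k : Nat)
    (hk : k < ds.length) :
    (L.foldl (ci_col s) ds).getD k 0
      = ds.getD k 0
        + ((L.countP (fun jc => decide (jc.2 ≠ PySem.List.pyGetD s ((k : Int) + jc.1) ' '))) : Int) := by
  induction L generalizing ds with
  | nil => simp
  | cons jc t ih =>
      rw [List.foldl_cons, ih (ci_col s ds jc) (by rw [ci_col_length]; exact hk),
        ci_col_getD s ds jc k hk, List.countP_cons]
      by_cases h : jc.2 = PySem.List.pyGetD s ((k : Int) + jc.1) ' '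
      · simp [h]
      · simp [h]
        ring

theorem main_eq (pat seq : String) : count_instances pat seq = count_instances_alt pat seq := by
  simp only [count_instances, count_instances_alt]
  set p := pat.toList with hp
  set s := seq.toList with hs
  have hlp : PySem.Str.len pat = (p.length : Int) := by simp [PySem.Str.len_eq, hp]
  have hls : PySem.Str.len seq = (s.length : Int) := by simp [PySem.Str.len_eq, hs]
  rw [hlp, hls]
  by_cases hn : (s.length : Int) - (p.length : Int) ≤ 0
  · rw [PySem.List.pyRange_one_eq_nil (by omega), if_pos hn]
    rfl
  · rw [if_neg hn]
    set N := ((s.length : Int) - (p.length : Int)).toNat with hN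
    have hNlen : N + p.length = s.length := by omega
    -- B's table equals the mismatch table
    have hdiffs :
        (PySem.List.enumerate p 0).foldl (ci_col s) (List.replicate N (0 : Int))
          = (List.range N).map (fun k => (mism p s k : Int)) := by
      apply List.ext_getElem
      · simp [colfold_length]
      · intro k hk1 hk2
        have hkN : k < N := by simpa [colfold_length] using hk1
        rw [← List.getD_eq_getElem _ 0, ← List.getD_eq_getElem _ 0,
          colfold_getD s _ _ k (by simpa using hkN)]
        rw [enum_char, List.countP_map]
        simp only [List.getD_eq_getElem?_getD, List.getElem?_replicate, hkN, if_pos,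
          List.getElem?_map, List.getElem?_range, Option.map_some, Option.getD_some,
          zero_add]
        congr 1
        rw [mism]
        apply List.countP_congr
        intro j hj
        have hjp : j < p.length := List.mem_range.mp hj
        have hcast : (k : Int) + ((0:Int) + (j : Int)) = ((k + j : Nat) : Int) := by
          push_cast; ring
        simp only [Function.comp_def]
        have hcast2 : (k : Int) + (j : Int) = ((k + j : Nat) : Int) := by push_cast; ring
        rw [hcast2, PySem.List.pyGetD_natCast]
        simp [List.getD_eq_getElem?_getD]
    rw [hdiffs]
    -- both sides are counts over range N
    rw [PySem.List.foldl_ite_add_one (p := fun d : Int => d ≤ 3), List.countP_map]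
    rw [PySem.List.foldl_ite_add_one (p := fun i : Int =>
      (p.zip (PySem.List.slice s (some i) (some (i + (p.length : Int) + 1)))).foldl
        (fun d ab => if ab.1 ≠ ab.2 then d + 1 else d) (0 : Int) ≤ 3)]
    rw [PySem.List.pyRange_one, List.countP_map, sub_zero, ← hN]
    simp only [zero_add, Int.natCast_inj]
    apply List.countP_congr
    intro k hk
    have hkN : k < N := List.mem_range.mp hk
    have h0 : (0:Int) ≤ (k:Int) := by positivity
    have h1 : ((k:Int)).toNat + p.length ≤ s.length := by omega
    simp only [Function.comp_def, diffA_eq p s (k:Int) h0 h1, Int.toNat_natCast]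

-- ===== VERDICT (by name: the statement is the Claim_ definition above) =====
theorem count_instances_spec : Claim_equal_count_instances := by
  intro pat seq _
  unfold Spec_count_instances
  exact main_eq pat seq
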